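-- pv_equiv track=rewrite | github.com/youliang-zhu/SmartFill | backend/app/services/native/pipeline.py | _build_field_name
-- ===== SOURCE A (Python) =====
-- from typing import Dict, List, Tuple
--
-- def _build_field_name(field: Dict[str, object], page_num: int, idx: int) -> str:
--     field_type = str(field.get("field_type", "text"))
--     label = str(field.get("label", "")).strip().lower()
--     slug_chars: List[str] = []
--     for ch in label:
--         if ch.isalnum():
--             slug_chars.append(ch)
--         elif slug_chars and slug_chars[-1] != "_":
--             slug_chars.append("_")
--     slug = "".join(slug_chars).strip("_")[:24] or "field"
--     return f"p{page_num}_{field_type}_{idx:03d}_{slug}"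
-- ===== SOURCE B (Python) =====
-- from itertools import groupby
-- from typing import Dict
--
-- def _build_field_name(field: Dict[str, object], page_num: int, idx: int) -> str:
--     field_type = str(field.get("field_type", "text"))
--     label = str(field.get("label", "")).strip().lower()
--     tokens = ("".join(run) for is_alnum, run in groupby(label, str.isalnum) if is_alnum)
--     slug = "_".join(tokens)[:24] or "field"
--     return f"p{page_num}_{field_type}_{idx:03d}_{slug}"
-- ===== Notes on version B (the rewrite author's own statement) =====
-- stated objective: idiomatic
-- what changed: Replaces the char-by-char conditional-underscore accumulation (with a final strip('_')) by grouping the label into alnum/non-alnum runs (itertools.groupby), keeping the alnum runs and joining them with '_', which needs no strip.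
import Mathlib
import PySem

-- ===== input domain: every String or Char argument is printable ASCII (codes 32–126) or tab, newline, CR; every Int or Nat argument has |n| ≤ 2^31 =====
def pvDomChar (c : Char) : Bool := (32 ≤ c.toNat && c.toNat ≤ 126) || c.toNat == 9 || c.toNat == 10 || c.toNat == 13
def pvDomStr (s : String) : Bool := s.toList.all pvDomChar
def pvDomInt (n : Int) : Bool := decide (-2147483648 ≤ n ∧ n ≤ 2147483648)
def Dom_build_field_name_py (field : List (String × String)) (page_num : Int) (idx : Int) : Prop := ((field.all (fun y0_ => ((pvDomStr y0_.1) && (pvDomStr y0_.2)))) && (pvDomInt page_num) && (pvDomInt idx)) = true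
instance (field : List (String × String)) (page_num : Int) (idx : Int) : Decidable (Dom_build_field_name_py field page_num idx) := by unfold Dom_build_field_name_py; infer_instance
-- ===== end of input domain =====

-- B replaces A's char-by-char conditional-underscore accumulation (plus a final strip('_')) by
-- grouping the label into alnum/non-alnum runs and joining the alnum runs with '_' (idiomatic; same cost).

-- ===== PORT A =====
-- the body of A's for-loop over the label
def pvStepA (acc : List Char) (ch : Char) : List Char :=
  if PySem.Chars.isalnum ch then acc ++ [ch]
  else if acc ≠ [] ∧ acc.getLast? ≠ some '_' then acc ++ ['_'] else acc

def build_field_name_py (field : List (String × String)) (page_num : Int) (idx : Int) : String :=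
  let d := PySem.Dict.ofList field
  let field_type := d.getD "field_type" "text"
  let label := PySem.Chars.lower (PySem.Chars.strip (d.getD "label" "").toList)
  let slug_chars := label.foldl pvStepA []
  let slug0 := PySem.Chars.slice (PySem.Chars.stripChars slug_chars ['_']) none (some 24)
  let slug := if slug0 = [] then "field".toList else slug0
  String.mk ("p".toList ++ PySem.Int.toChars page_num ++ "_".toList ++ field_type.toList
    ++ "_".toList ++ PySem.Chars.zfill (PySem.Int.toChars idx) 3 ++ "_".toList ++ slug)

-- ===== PORT B =====
-- itertools.groupby(label, str.isalnum): consecutive runs with their key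
def pvGroupby : List Char → List (Bool × List Char)
  | [] => []
  | c :: rest =>
    match pvGroupby rest with
    | (k, g) :: gs =>
        if PySem.Chars.isalnum c = k then (k, c :: g) :: gs
        else (PySem.Chars.isalnum c, [c]) :: (k, g) :: gs
    | [] => [(PySem.Chars.isalnum c, [c])]

def build_field_name_py_alt (field : List (String × String)) (page_num : Int) (idx : Int) : String :=
  let d := PySem.Dict.ofList field
  let field_type := d.getD "field_type" "text"
  let label := PySem.Chars.lower (PySem.Chars.strip (d.getD "label" "").toList)
  let tokens := ((pvGroupby label).filter (·.1)).map (·.2)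
  let slug0 := PySem.Chars.slice (PySem.Chars.join "_".toList tokens) none (some 24)
  let slug := if slug0 = [] then "field".toList else slug0
  String.mk ("p".toList ++ PySem.Int.toChars page_num ++ "_".toList ++ field_type.toList
    ++ "_".toList ++ PySem.Chars.zfill (PySem.Int.toChars idx) 3 ++ "_".toList ++ slug)

-- ===== PRECONDITION & SPEC =====
def Spec_build_field_name_py (field : List (String × String)) (page_num : Int) (idx : Int) (out : String) : Prop := out = build_field_name_py_alt field page_num idx
instance (field : List (String × String)) (page_num : Int) (idx : Int) (out : String) : Decidable (Spec_build_field_name_py field page_num idx out) := by unfold Spec_build_field_name_py; infer_instance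

-- ===== CLAIM (what is proved, stated in full; the proofs are below) =====
def Claim_equal_build_field_name_py : Prop := ∀ (field : List (String × String)) (page_num : Int) (idx : Int), Dom_build_field_name_py field page_num idx → Spec_build_field_name_py field page_num idx (build_field_name_py field page_num idx)

-- ===== LEMMAS AND PROOFS =====

-- the state of A's loop that matters: whether a separator must be emitted before skipping non-alnum
def pvT : Bool → List Char → List Char
  | _, [] => []
  | a, c :: cs =>
    if PySem.Chars.isalnum c then c :: pvT true cs
    else if a then '_' :: pvT false cs else pvT false cs

-- B's joined tokens
def pvTok (cs : List Char) : List (List Char) := ((pvGroupby cs).filter (·.1)).map (·.2)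
def pvJ (cs : List Char) : List Char := PySem.Chars.join "_".toList (pvTok cs)

lemma pvAlnumNeUnd {x : Char} (h : PySem.Chars.isalnum x = true) : x ≠ '_' := by
  intro he; subst he; exact absurd h (by decide)

lemma pvFoldl (cs : List Char) : ∀ acc : List Char,
    List.foldl pvStepA acc cs = acc ++ pvT (decide (acc ≠ [] ∧ acc.getLast? ≠ some '_')) cs := by
  induction cs with
  | nil => intro acc; simp [pvT]
  | cons c cs ih =>
    intro acc
    rw [List.foldl_cons, ih (pvStepA acc c)]
    by_cases hc : PySem.Chars.isalnum c = true
    · have hne : c ≠ '_' := pvAlnumNeUnd hc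
      simp [pvStepA, hc, pvT, hne]
    · by_cases ha : acc ≠ [] ∧ acc.getLast? ≠ some '_'
      · simp [pvStepA, hc, ha, pvT]
      · simp [pvStepA, hc, ha, pvT]

lemma pvGroupby_head (c : Char) (cs : List Char) :
    ∃ g gs, pvGroupby (c :: cs) = (PySem.Chars.isalnum c, c :: g) :: gs := by
  show ∃ g gs, (match pvGroupby cs with
    | (k, g) :: gs =>
        if PySem.Chars.isalnum c = k then (k, c :: g) :: gs
        else (PySem.Chars.isalnum c, [c]) :: (k, g) :: gs
    | [] => [(PySem.Chars.isalnum c, [c])]) = (PySem.Chars.isalnum c, c :: g) :: gs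
  match h : pvGroupby cs with
  | [] => exact ⟨[], [], rfl⟩
  | (k, g) :: gs =>
    by_cases hk : PySem.Chars.isalnum c = k
    · subst hk; exact ⟨g, gs, by simp⟩
    · exact ⟨[], (k, g) :: gs, by simp [hk]⟩

lemma pvGroupby_ne_nil (cs : List Char) : ∀ p ∈ pvGroupby cs, p.2 ≠ [] := by
  induction cs with
  | nil => simp [pvGroupby]
  | cons c cs ih =>
    intro p hp
    unfold pvGroupby at hp
    match h : pvGroupby cs with
    | [] => rw [h] at hp; simp at hp; simp [hp]
    | (k, g) :: gs =>
      rw [h] at hp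
      by_cases hk : PySem.Chars.isalnum c = k
      · simp [hk] at hp
        rcases hp with hp | hp
        · simp [hp]
        · exact ih p (by rw [h]; exact List.mem_cons_of_mem _ hp)
      · simp [hk] at hp
        rcases hp with hp | hp
        · simp [hp]
        · exact ih p (by rw [h]; simpa using hp)

lemma pvTok_ne_nil (cs : List Char) : ∀ t ∈ pvTok cs, t ≠ [] := by
  intro t ht
  unfold pvTok at ht
  simp only [List.mem_map, List.mem_filter] at ht
  obtain ⟨p, ⟨hp, _⟩, rfl⟩ := ht
  exact pvGroupby_ne_nil cs p hp

lemma pvJoin_nil : PySem.Chars.join "_".toList [] = [] := rfl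

lemma pvJoin_single (t : List Char) : PySem.Chars.join "_".toList [t] = t := by
  simp [PySem.Chars.join, List.intercalate]

lemma pvJoin_cons (t u : List Char) (ts : List (List Char)) :
    PySem.Chars.join "_".toList (t :: u :: ts) = t ++ '_' :: PySem.Chars.join "_".toList (u :: ts) := by
  simp [PySem.Chars.join, List.intercalate, List.intersperse]

lemma pvJoin_head (c : Char) (t : List Char) (ts : List (List Char)) :
    PySem.Chars.join "_".toList ((c :: t) :: ts) = c :: PySem.Chars.join "_".toList (t :: ts) := by
  cases ts with
  | nil => rw [pvJoin_single, pvJoin_single]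
  | cons u ts => rw [pvJoin_cons, pvJoin_cons]; rfl

lemma pvTok_nil : pvTok [] = [] := rfl

lemma pvGroupby_cons (c : Char) (cs : List Char) : pvGroupby (c :: cs) =
    (match pvGroupby cs with
     | (k, g) :: gs =>
         if PySem.Chars.isalnum c = k then (k, c :: g) :: gs
         else (PySem.Chars.isalnum c, [c]) :: (k, g) :: gs
     | [] => [(PySem.Chars.isalnum c, [c])]) := rfl

lemma pvGetLast_cons (a : Char) (l : List Char) (h : l ≠ []) : (a :: l).getLast? = l.getLast? := by
  cases l with
  | nil => exact absurd rfl h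
  | cons b l => simp [List.getLast?_cons_cons]

lemma pvTok_cons_not (c : Char) (cs : List Char) (hc : PySem.Chars.isalnum c = false) :
    pvTok (c :: cs) = pvTok cs := by
  unfold pvTok
  rw [pvGroupby_cons]
  match h : pvGroupby cs with
  | [] => simp [hc]
  | (k, g) :: gs =>
    by_cases hk : PySem.Chars.isalnum c = k
    · have hk' : k = false := hk ▸ hc
      subst hk'
      simp [hc]
    · cases k with
      | false => exact absurd hc hk
      | true => simp [hc]

lemma pvTok_single (c : Char) (hc : PySem.Chars.isalnum c = true) : pvTok [c] = [[c]] := by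
  unfold pvTok; simp [pvGroupby, hc]

lemma pvTok_cons_cons_al (c d : Char) (ds : List Char)
    (hc : PySem.Chars.isalnum c = true) (hd : PySem.Chars.isalnum d = true) :
    ∃ t ts, pvTok (d :: ds) = t :: ts ∧ pvTok (c :: d :: ds) = (c :: t) :: ts := by
  obtain ⟨g, gs, hg⟩ := pvGroupby_head d ds
  rw [hd] at hg
  refine ⟨d :: g, (gs.filter (·.1)).map (·.2), ?_, ?_⟩
  · unfold pvTok; rw [hg]; simp
  · unfold pvTok
    rw [pvGroupby_cons, hg]
    simp [hc]

lemma pvTok_cons_cons_not (c d : Char) (ds : List Char)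
    (hc : PySem.Chars.isalnum c = true) (hd : PySem.Chars.isalnum d = false) :
    pvTok (c :: d :: ds) = [c] :: pvTok (d :: ds) := by
  obtain ⟨g, gs, hg⟩ := pvGroupby_head d ds
  rw [hd] at hg
  unfold pvTok
  rw [pvGroupby_cons, hg]
  simp [hc]

lemma pvJ_ne_nil_of_tok (cs : List Char) (t : List Char) (ts : List (List Char))
    (h : pvTok cs = t :: ts) : pvJ cs ≠ [] := by
  have ht : t ≠ [] := pvTok_ne_nil cs t (by rw [h]; exact List.mem_cons_self)
  unfold pvJ
  rw [h]
  cases ts with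
  | nil => rw [pvJoin_single]; exact ht
  | cons u ts => rw [pvJoin_cons]; simp

lemma pvMain (cs : List Char) :
    (pvT false cs = pvJ cs ∨ pvT false cs = pvJ cs ++ ['_'])
    ∧ (∀ x, (pvT false cs).head? = some x → PySem.Chars.isalnum x = true)
    ∧ (∀ x, (pvJ cs).getLast? = some x → PySem.Chars.isalnum x = true) := by
  induction cs with
  | nil =>
    refine ⟨Or.inl ?_, ?_, ?_⟩ <;> simp [pvT, pvJ, pvTok_nil]
  | cons c cs ih =>
    obtain ⟨ihor, ihhd, ihlast⟩ := ih
    by_cases hc : PySem.Chars.isalnum c = true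
    · cases cs with
      | nil =>
        have hJ : pvJ [c] = [c] := by unfold pvJ; rw [pvTok_single c hc, pvJoin_single]
        refine ⟨Or.inl ?_, ?_, ?_⟩
        · simp [pvT, hc, hJ]
        · intro x hx; simp [pvT, hc] at hx; subst hx; exact hc
        · intro x hx; rw [hJ] at hx; simp at hx; subst hx; exact hc
      | cons d ds =>
        by_cases hd : PySem.Chars.isalnum d = true
        · obtain ⟨t, ts, h1, h2⟩ := pvTok_cons_cons_al c d ds hc hd
          have hTeq : pvT false (c :: d :: ds) = c :: pvT false (d :: ds) := by
            simp [pvT, hc, hd]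
          have hJeq : pvJ (c :: d :: ds) = c :: pvJ (d :: ds) := by
            unfold pvJ; rw [h1, h2, pvJoin_head]
          have hJne : pvJ (d :: ds) ≠ [] := pvJ_ne_nil_of_tok _ t ts h1
          refine ⟨?_, ?_, ?_⟩
          · rw [hTeq, hJeq]
            rcases ihor with h | h
            · exact Or.inl (by rw [h])
            · exact Or.inr (by rw [h]; rfl)
          · intro x hx; rw [hTeq] at hx; simp at hx; subst hx; exact hc
          · intro x hx
            rw [hJeq] at hx
            apply ihlast
            rwa [pvGetLast_cons c _ hJne] at hx
        · have hd' : PySem.Chars.isalnum d = false := by simpa using hd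
          have hTeq : pvT false (c :: d :: ds) = c :: '_' :: pvT false (d :: ds) := by
            simp [pvT, hc, hd']
          by_cases hT : pvTok (d :: ds) = []
          · have hJnil : pvJ (d :: ds) = [] := by unfold pvJ; rw [hT, pvJoin_nil]
            have hTnil : pvT false (d :: ds) = [] := by
              rcases ihor with h | h
              · rw [h, hJnil]
              · rw [hJnil] at h
                exfalso
                have := ihhd '_' (by rw [h]; rfl)
                exact absurd this (by decide)
            have hJeq : pvJ (c :: d :: ds) = [c] := by
              unfold pvJ; rw [pvTok_cons_cons_not c d ds hc hd', hT, pvJoin_single]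
            refine ⟨Or.inr ?_, ?_, ?_⟩
            · rw [hTeq, hTnil, hJeq]; rfl
            · intro x hx; rw [hTeq] at hx; simp at hx; subst hx; exact hc
            · intro x hx; rw [hJeq] at hx; simp at hx; subst hx; exact hc
          · obtain ⟨t, ts, hts⟩ : ∃ t ts, pvTok (d :: ds) = t :: ts := by
              cases h : pvTok (d :: ds) with
              | nil => exact absurd h hT
              | cons t ts => exact ⟨t, ts, rfl⟩
            have hJne : pvJ (d :: ds) ≠ [] := pvJ_ne_nil_of_tok _ t ts hts
            have hJeq : pvJ (c :: d :: ds) = c :: '_' :: pvJ (d :: ds) := by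
              unfold pvJ
              rw [pvTok_cons_cons_not c d ds hc hd', hts, pvJoin_cons, ← hts]
              rfl
            refine ⟨?_, ?_, ?_⟩
            · rw [hTeq, hJeq]
              rcases ihor with h | h
              · exact Or.inl (by rw [h])
              · exact Or.inr (by rw [h]; rfl)
            · intro x hx; rw [hTeq] at hx; simp at hx; subst hx; exact hc
            · intro x hx
              rw [hJeq] at hx
              apply ihlast
              rwa [pvGetLast_cons c _ (List.cons_ne_nil _ _), pvGetLast_cons '_' _ hJne] at hx
    · have hc' : PySem.Chars.isalnum c = false := by simpa using hc
      have hTeq : pvT false (c :: cs) = pvT false cs := by simp [pvT, hc']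
      have hJeq : pvJ (c :: cs) = pvJ cs := by unfold pvJ; rw [pvTok_cons_not c cs hc']
      exact ⟨by rw [hTeq, hJeq]; exact ihor, by rw [hTeq]; exact ihhd, by rw [hJeq]; exact ihlast⟩

lemma pvDropId (s : List Char) (h : ∀ x, s.head? = some x → x ≠ '_') :
    s.dropWhile (fun c => List.contains ['_'] c) = s := by
  cases s with
  | nil => rfl
  | cons a l =>
    have ha := h a rfl
    rw [List.dropWhile_cons, if_neg (by simp [ha])]

lemma pvStripAux (J s : List Char) (horJ : s = J ∨ s = J ++ ['_'])
    (hhd : ∀ x, s.head? = some x → x ≠ '_')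
    (hlast : ∀ x, J.getLast? = some x → x ≠ '_') :
    PySem.Chars.stripChars s ['_'] = J := by
  rw [show PySem.Chars.stripChars s ['_'] =
        (List.dropWhile (fun c => List.contains ['_'] c)
          (List.dropWhile (fun c => List.contains ['_'] c) s).reverse).reverse from rfl]
  rw [pvDropId s hhd]
  rcases horJ with rfl | rfl
  · rw [pvDropId _ (by intro x hx; exact hlast x (by rwa [List.head?_reverse] at hx))]
    exact List.reverse_reverse _
  · have hrev : (J ++ ['_']).reverse = '_' :: J.reverse := by simp
    rw [hrev, List.dropWhile_cons, if_pos (by simp)]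
    rw [pvDropId _ (by intro x hx; exact hlast x (by rwa [List.head?_reverse] at hx))]
    exact List.reverse_reverse _

lemma pvStrip (cs : List Char) :
    PySem.Chars.stripChars (List.foldl pvStepA [] cs) ['_'] = pvJ cs := by
  have hfold : List.foldl pvStepA [] cs = pvT false cs := by
    rw [pvFoldl cs []]; simp
  rw [hfold]
  obtain ⟨hor, hhd, hlast⟩ := pvMain cs
  exact pvStripAux (pvJ cs) (pvT false cs) hor
    (fun x hx => pvAlnumNeUnd (hhd x hx))
    (fun x hx => pvAlnumNeUnd (hlast x hx))

-- ===== VERDICT (by name: the statement is the Claim_ definition above) =====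
theorem build_field_name_py_spec : Claim_equal_build_field_name_py := by
  intro field page_num idx _
  unfold Spec_build_field_name_py build_field_name_py build_field_name_py_alt
  simp only [pvStrip, pvJ, pvTok]
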